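-- pv_equiv track=rewrite | github.com/feezy777/NeuroGraphIQ_KG | scripts/modules/workbench/extraction/extraction_service.py | _batch_table_lines
-- ===== SOURCE A (Python) =====
-- from typing import Any, Dict, List, Optional, Tuple
--
-- def _batch_joined_lines(lines: List[str], max_chars: int) -> List[str]:
--     """按字符预算将多行文本切成若干批，顺序遍历整张表。"""
--     if not lines:
--         return []
--     if max_chars < 500:
--         max_chars = 500
--     batches: List[str] = []
--     cur: List[str] = []
--     cur_len = 0
--     for line in lines:
--         if len(line) > max_chars:
--             if cur:
--                 batches.append("\n".join(cur))
--                 cur = []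
--                 cur_len = 0
--             for i in range(0, len(line), max_chars):
--                 batches.append(line[i : i + max_chars])
--             continue
--         add_len = len(line) if not cur else 1 + len(line)
--         if cur and cur_len + add_len > max_chars:
--             batches.append("\n".join(cur))
--             cur = [line]
--             cur_len = len(line)
--         else:
--             cur.append(line)
--             cur_len += add_len
--     if cur:
--         batches.append("\n".join(cur))
--     return batches
--
-- def _batch_table_lines(lines: List[str], max_chars: int, rows_per_batch: int) -> List[str]:
--     """表格行分批：rows_per_batch>0 时先按固定行数切段，再对每段做字符预算切分（防单行超长）。"""
--     if not lines:
--         return []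
--     if rows_per_batch <= 0:
--         return _batch_joined_lines(lines, max_chars)
--     if max_chars < 500:
--         max_chars = 500
--     batches: List[str] = []
--     for i in range(0, len(lines), rows_per_batch):
--         chunk = lines[i : i + rows_per_batch]
--         batches.extend(_batch_joined_lines(chunk, max_chars))
--     return batches
-- ===== SOURCE B (Python) =====
-- from typing import List
--
--
-- def _row_chunks(lines: List[str], k: int) -> List[List[str]]:
--     if k <= 0:
--         return [lines]
--     return [lines[i:i + k] for i in range(0, len(lines), k)]
--
--
-- def _greedy_batches(chunk: List[str], mc: int) -> List[str]:
--     # Repeatedly emit either the pieces of one oversized line or the join of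
--     # the longest prefix of fitting lines whose joined length stays <= mc.
--     out: List[str] = []
--     i = 0
--     n = len(chunk)
--     while i < n:
--         line = chunk[i]
--         if len(line) > mc:
--             for j in range(0, len(line), mc):
--                 out.append(line[j:j + mc])
--             i += 1
--             continue
--         k = i + 1
--         total = len(line)
--         while k < n and len(chunk[k]) <= mc and total + 1 + len(chunk[k]) <= mc:
--             total += 1 + len(chunk[k])
--             k += 1
--         out.append("\n".join(chunk[i:k]))
--         i = k
--     return out
--
--
-- def _batch_table_lines(lines: List[str], max_chars: int, rows_per_batch: int) -> List[str]:
--     mc = max(500, max_chars)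
--     out: List[str] = []
--     for chunk in _row_chunks(lines, rows_per_batch):
--         out.extend(_greedy_batches(chunk, mc))
--     return out
-- ===== Notes on version B (the rewrite author's own statement) =====
-- stated objective: alternative
-- what changed: Replaces A's running cur/cur_len accumulator fold (flush-on-overflow inside a stateful loop, nested inside a chunk-slicing outer loop) with a stateless prefix-taking scheme: split into row chunks once, then repeatedly compute the longest prefix of fitting lines whose joined length stays within budget and emit its join (or the pieces of one oversized line), so no flush state is carried between emitted batches.
import Mathlib
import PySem

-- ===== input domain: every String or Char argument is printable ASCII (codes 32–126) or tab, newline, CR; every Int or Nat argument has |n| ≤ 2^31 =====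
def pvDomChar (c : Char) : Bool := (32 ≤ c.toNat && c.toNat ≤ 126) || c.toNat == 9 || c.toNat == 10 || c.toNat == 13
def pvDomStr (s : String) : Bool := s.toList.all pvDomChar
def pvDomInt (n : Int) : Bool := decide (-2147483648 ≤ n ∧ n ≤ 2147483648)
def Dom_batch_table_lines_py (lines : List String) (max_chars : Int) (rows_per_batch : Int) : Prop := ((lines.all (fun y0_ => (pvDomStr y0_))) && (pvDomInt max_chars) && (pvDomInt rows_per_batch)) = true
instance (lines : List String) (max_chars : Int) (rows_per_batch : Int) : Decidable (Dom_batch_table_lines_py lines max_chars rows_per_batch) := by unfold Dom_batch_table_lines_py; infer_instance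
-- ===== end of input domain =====

-- B replaces A's stateful cur/cur_len accumulator loop by a stateless scheme:
-- chunk the rows once, then repeatedly emit the join of the longest fitting
-- prefix (or the pieces of one oversized line); same values, no speed claim.

-- ===== PORT A =====
-- port of the helper _batch_joined_lines
def pvJoinedLines (lines : List String) (max_chars : Int) : List String :=
  if lines = [] then [] else
  let mc := if max_chars < 500 then 500 else max_chars
  let st := lines.foldl (fun (st : List String × List String × Int) line =>
      match st with
      | (batches, cur, cur_len) =>
        if mc < PySem.Str.len line then
          let st2 : List String × List String × Int :=
            if cur ≠ [] then (batches ++ [PySem.Str.join "\n" cur], [], 0) else (batches, cur, cur_len)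
          ((PySem.List.pyRange 0 (PySem.Str.len line) mc).foldl
              (fun b i => b ++ [PySem.Str.slice line (some i) (some (i + mc))]) st2.1,
            st2.2.1, st2.2.2)
        else
          let add_len : Int := if cur = [] then PySem.Str.len line else 1 + PySem.Str.len line
          if cur ≠ [] ∧ mc < cur_len + add_len then
            (batches ++ [PySem.Str.join "\n" cur], [line], PySem.Str.len line)
          else
            (batches, cur ++ [line], cur_len + add_len))
    ([], [], 0)
  st.1 ++ (if st.2.1 ≠ [] then [PySem.Str.join "\n" st.2.1] else [])

def batch_table_lines_py (lines : List String) (max_chars : Int) (rows_per_batch : Int) : List String :=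
  if lines = [] then [] else
  if rows_per_batch ≤ 0 then pvJoinedLines lines max_chars else
  let mc := if max_chars < 500 then 500 else max_chars
  (PySem.List.pyRange 0 (lines.length : Int) rows_per_batch).foldl
    (fun batches i =>
      batches ++ pvJoinedLines (PySem.List.slice lines (some i) (some (i + rows_per_batch))) mc) []

-- ===== PORT B =====
-- port of _row_chunks
def pvRowChunks (lines : List String) (k : Int) : List (List String) :=
  if k ≤ 0 then [lines]
  else (PySem.List.pyRange 0 (lines.length : Int) k).map
    (fun i => PySem.List.slice lines (some i) (some (i + k)))

-- the inner while loop of _greedy_batches: how many further lines fit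
def pvTakeFit (mc : Int) : Int → List String → Nat
  | _, [] => 0
  | total, y :: t =>
    if PySem.Str.len y ≤ mc ∧ total + 1 + PySem.Str.len y ≤ mc then
      1 + pvTakeFit mc (total + 1 + PySem.Str.len y) t
    else 0

-- port of _greedy_batches (the outer while loop as structural recursion)
def pvGreedy (mc : Int) : List String → List String
  | [] => []
  | x :: t =>
    if mc < PySem.Str.len x then
      ((PySem.List.pyRange 0 (PySem.Str.len x) mc).map
        (fun j => PySem.Str.slice x (some j) (some (j + mc)))) ++ pvGreedy mc t
    else
      let k := pvTakeFit mc (PySem.Str.len x) t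
      PySem.Str.join "\n" (x :: t.take k) :: pvGreedy mc (t.drop k)
termination_by xs => xs.length
decreasing_by
  all_goals simp

def batch_table_lines_py_alt (lines : List String) (max_chars : Int) (rows_per_batch : Int) : List String :=
  let mc := max 500 max_chars
  (pvRowChunks lines rows_per_batch).foldl (fun out c => out ++ pvGreedy mc c) []

-- ===== PRECONDITION & SPEC =====
def Spec_batch_table_lines_py (lines : List String) (max_chars : Int) (rows_per_batch : Int) (out : List String) : Prop := out = batch_table_lines_py_alt lines max_chars rows_per_batch
instance (lines : List String) (max_chars : Int) (rows_per_batch : Int) (out : List String) : Decidable (Spec_batch_table_lines_py lines max_chars rows_per_batch out) := by unfold Spec_batch_table_lines_py; infer_instance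

-- ===== CLAIM (what is proved, stated in full; the proofs are below) =====
def Claim_equal_batch_table_lines_py : Prop := ∀ (lines : List String) (max_chars : Int) (rows_per_batch : Int), Dom_batch_table_lines_py lines max_chars rows_per_batch → Spec_batch_table_lines_py lines max_chars rows_per_batch (batch_table_lines_py lines max_chars rows_per_batch)

-- ===== LEMMAS AND PROOFS =====

-- the loop body of A's helper, named for the proofs
def gstep (mc : Int) (st : List String × List String × Int) (line : String) :
    List String × List String × Int :=
  match st with
  | (batches, cur, cur_len) =>
    if mc < PySem.Str.len line then
      let st2 : List String × List String × Int :=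
        if cur ≠ [] then (batches ++ [PySem.Str.join "\n" cur], [], 0) else (batches, cur, cur_len)
      ((PySem.List.pyRange 0 (PySem.Str.len line) mc).foldl
          (fun b i => b ++ [PySem.Str.slice line (some i) (some (i + mc))]) st2.1,
        st2.2.1, st2.2.2)
    else
      let add_len : Int := if cur = [] then PySem.Str.len line else 1 + PySem.Str.len line
      if cur ≠ [] ∧ mc < cur_len + add_len then
        (batches ++ [PySem.Str.join "\n" cur], [line], PySem.Str.len line)
      else
        (batches, cur ++ [line], cur_len + add_len)

def pvFlush (st : List String × List String × Int) : List String :=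
  st.1 ++ (if st.2.1 ≠ [] then [PySem.Str.join "\n" st.2.1] else [])

def pvJ (mc : Int) (xs : List String) : List String :=
  pvFlush (xs.foldl (gstep mc) ([], [], 0))

lemma pvJoined_eq (xs : List String) (m : Int) :
    pvJoinedLines xs m = pvJ (if m < 500 then 500 else m) xs := by
  cases xs with
  | nil => simp [pvJoinedLines, pvJ, pvFlush]
  | cons y t => rfl

lemma chars_join_append_singleton (sep b : List Char) :
    ∀ (A : List (List Char)), A ≠ [] →
      PySem.Chars.join sep (A ++ [b]) = PySem.Chars.join sep A ++ sep ++ b := by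
  intro A
  induction A with
  | nil => intro h; exact absurd rfl h
  | cons a t ih =>
    intro _
    cases t with
    | nil => simp [PySem.Chars.join_cons_cons, PySem.Chars.join_singleton]
    | cons a2 t2 =>
      simp only [List.cons_append]
      rw [PySem.Chars.join_cons_cons, PySem.Chars.join_cons_cons]
      have ih' := ih (by simp)
      simp only [List.cons_append] at ih'
      rw [ih']
      simp [List.append_assoc]

lemma jlen_singleton (y : String) :
    PySem.Str.len (PySem.Str.join "\n" [y]) = PySem.Str.len y := by
  simp [PySem.Str.len_eq, PySem.Str.toList_join, PySem.Chars.join_singleton]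

lemma jlen_append (cur : List String) (y : String) (h : cur ≠ []) :
    PySem.Str.len (PySem.Str.join "\n" (cur ++ [y])) =
      PySem.Str.len (PySem.Str.join "\n" cur) + 1 + PySem.Str.len y := by
  have hm : (cur.map String.toList) ≠ [] := by simpa using h
  simp only [PySem.Str.len_eq, PySem.Str.toList_join, List.map_append, List.map_cons,
    List.map_nil]
  rw [chars_join_append_singleton _ _ _ hm]
  simp [List.length_append]
  ring

lemma gstep_big_nil (mc : Int) (b : List String) (y : String) (h : mc < PySem.Str.len y) :
    gstep mc (b, [], 0) y =
      (b ++ (PySem.List.pyRange 0 (PySem.Str.len y) mc).map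
        (fun j => PySem.Str.slice y (some j) (some (j + mc))), [], 0) := by
  simp only [gstep]
  rw [if_pos h, if_neg (by simp)]
  rw [PySem.List.foldl_append_singleton_eq_map]

lemma gstep_big_cons (mc : Int) (b cur : List String) (cl : Int) (y : String)
    (h : mc < PySem.Str.len y) (hcur : cur ≠ []) :
    gstep mc (b, cur, cl) y =
      ((b ++ [PySem.Str.join "\n" cur]) ++ (PySem.List.pyRange 0 (PySem.Str.len y) mc).map
        (fun j => PySem.Str.slice y (some j) (some (j + mc))), [], 0) := by
  simp only [gstep]
  rw [if_pos h, if_pos hcur]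
  rw [PySem.List.foldl_append_singleton_eq_map]

lemma gstep_small_nil (mc : Int) (b : List String) (y : String) (h : ¬ mc < PySem.Str.len y) :
    gstep mc (b, [], 0) y = (b, [y], PySem.Str.len y) := by
  have h' : ¬ mc < ((y.length : Int)) := by simpa [PySem.Str.len_eq] using h
  simp [gstep, h', PySem.Str.len_eq]

lemma gstep_small_flush (mc : Int) (b cur : List String) (cl : Int) (y : String)
    (h : ¬ mc < PySem.Str.len y) (hcur : cur ≠ [])
    (hfl : mc < cl + (1 + PySem.Str.len y)) :
    gstep mc (b, cur, cl) y = (b ++ [PySem.Str.join "\n" cur], [y], PySem.Str.len y) := by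
  simp only [gstep]
  rw [if_neg h, if_neg hcur, if_pos ⟨hcur, hfl⟩]

lemma gstep_small_add (mc : Int) (b cur : List String) (cl : Int) (y : String)
    (h : ¬ mc < PySem.Str.len y) (hcur : cur ≠ [])
    (hfl : ¬ mc < cl + (1 + PySem.Str.len y)) :
    gstep mc (b, cur, cl) y = (b, cur ++ [y], cl + (1 + PySem.Str.len y)) := by
  simp only [gstep]
  rw [if_neg h, if_neg hcur, if_neg (by tauto)]

-- the heart: A's accumulator fold computes B's stateless prefix scheme
lemma greedy_main (mc : Int) (t : List String) :
    (∀ b : List String, pvFlush (t.foldl (gstep mc) (b, [], 0)) = b ++ pvGreedy mc t) ∧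
    (∀ (b cur : List String) (clen : Int), cur ≠ [] →
      clen = PySem.Str.len (PySem.Str.join "\n" cur) →
      pvFlush (t.foldl (gstep mc) (b, cur, clen)) =
        b ++ (PySem.Str.join "\n" (cur ++ t.take (pvTakeFit mc clen t)) ::
          pvGreedy mc (t.drop (pvTakeFit mc clen t)))) := by
  induction t with
  | nil =>
    constructor
    · intro b; simp [pvFlush, pvGreedy]
    · intro b cur clen hcur _
      simp [pvFlush, pvTakeFit, pvGreedy, hcur]
  | cons y t ih =>
    obtain ⟨ih0, ih1⟩ := ih
    constructor
    · intro b
      rw [List.foldl_cons]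
      by_cases hy : mc < PySem.Str.len y
      · rw [gstep_big_nil mc b y hy, ih0, pvGreedy, if_pos hy, List.append_assoc]
      · rw [gstep_small_nil mc b y hy,
          ih1 b [y] (PySem.Str.len y) (by simp) (jlen_singleton y).symm,
          pvGreedy, if_neg hy]
        simp
    · intro b cur clen hcur hlen
      rw [List.foldl_cons]
      by_cases hy : mc < PySem.Str.len y
      · rw [gstep_big_cons mc b cur clen y hy hcur, ih0]
        have hk : pvTakeFit mc clen (y :: t) = 0 := by
          rw [pvTakeFit, if_neg (by omega)]
        rw [hk]
        simp only [List.take_zero, List.drop_zero, List.append_nil]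
        rw [pvGreedy, if_pos hy]
        simp [List.append_assoc]
      · by_cases hfl : mc < clen + (1 + PySem.Str.len y)
        · rw [gstep_small_flush mc b cur clen y hy hcur hfl,
            ih1 _ [y] (PySem.Str.len y) (by simp) (jlen_singleton y).symm]
          have hk : pvTakeFit mc clen (y :: t) = 0 := by
            rw [pvTakeFit, if_neg (by omega)]
          rw [hk]
          simp only [List.take_zero, List.drop_zero, List.append_nil]
          rw [pvGreedy, if_neg hy]
          simp [List.append_assoc]
        · rw [gstep_small_add mc b cur clen y hy hcur hfl,
            ih1 b (cur ++ [y]) _ (by simp)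
              (by rw [jlen_append cur y hcur, ← hlen]; ring)]
          have hk : pvTakeFit mc clen (y :: t) =
              1 + pvTakeFit mc (clen + 1 + PySem.Str.len y) t := by
            rw [pvTakeFit, if_pos ⟨by omega, by omega⟩]
          have he : clen + (1 + PySem.Str.len y) = clen + 1 + PySem.Str.len y := by ring
          rw [he, hk, Nat.add_comm 1, List.take_succ_cons, List.drop_succ_cons]
          simp [List.append_assoc]

lemma pvJ_eq_greedy (mc : Int) (xs : List String) : pvJ mc xs = pvGreedy mc xs := by
  have := (greedy_main mc xs).1 []
  simpa [pvJ] using this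

lemma max_clamp (m : Int) : max 500 m = if m < 500 then 500 else m := by
  rw [Int.max_def]; split_ifs <;> omega

-- ===== VERDICT (by name: the statement is the Claim_ definition above) =====
theorem batch_table_lines_py_spec : Claim_equal_batch_table_lines_py := by
  intro lines m rpb _dom
  unfold Spec_batch_table_lines_py
  rw [show batch_table_lines_py_alt lines m rpb
      = (pvRowChunks lines rpb).foldl (fun out c => out ++ pvGreedy (max 500 m) c) [] from rfl,
    max_clamp]
  set mc : Int := if m < 500 then 500 else m with hmc
  have hclamp : (if mc < 500 then 500 else mc) = mc := by
    rw [hmc]; split_ifs <;> omega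
  by_cases hr : rpb ≤ 0
  · rw [show pvRowChunks lines rpb = [lines] from by rw [pvRowChunks, if_pos hr]]
    rw [List.foldl_cons, List.foldl_nil, List.nil_append]
    by_cases hl : lines = []
    · subst hl
      rw [show batch_table_lines_py [] m rpb = [] from rfl, pvGreedy]
    · rw [show batch_table_lines_py lines m rpb = pvJoinedLines lines m from by
        unfold batch_table_lines_py; rw [if_neg hl, if_pos hr]]
      rw [pvJoined_eq, ← hmc, pvJ_eq_greedy]
  · rw [show pvRowChunks lines rpb
        = (PySem.List.pyRange 0 (lines.length : Int) rpb).map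
            (fun i => PySem.List.slice lines (some i) (some (i + rpb))) from by
      rw [pvRowChunks, if_neg hr]]
    by_cases hl : lines = []
    · subst hl
      rw [show batch_table_lines_py [] m rpb = [] from rfl]
      have h0 : PySem.List.pyRange 0 (0 : Int) rpb = [] := by
        simp [PySem.List.pyRange]
      simp only [List.length_nil, Nat.cast_zero, h0, List.map_nil, List.foldl_nil]
    · rw [show batch_table_lines_py lines m rpb
          = (PySem.List.pyRange 0 (lines.length : Int) rpb).foldl
              (fun batches i => batches ++
                pvJoinedLines (PySem.List.slice lines (some i) (some (i + rpb))) mc) [] from by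
        unfold batch_table_lines_py; rw [if_neg hl, if_neg hr, hmc]]
      rw [List.foldl_map]
      apply PySem.List.foldl_congr_mem
      intro acc i _
      rw [pvJoined_eq, hclamp, pvJ_eq_greedy]
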